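-- pv_equiv track=rewrite | github.com/nguyenquyen1910/Python | Thuc hanh 1/MaHoa3.py | drm_encoding
-- ===== SOURCE A (Python) =====
-- def rotate_string(s, rotation):
--     rotated = []
--     for char in s:
--         newChar = chr((ord(char) - ord("A") + rotation) % 26 + ord("A"))
--         rotated.append(newChar)
--     return "".join(rotated)
--
-- def merge_strings(s1, s2):
--     merged = []
--     for char1, char2 in zip(s1, s2):
--         newChar = chr((ord(char1) - ord("A") + (ord(char2) - ord("A"))) % 26 + ord("A"))
--         merged.append(newChar)
--     return "".join(merged)
--
-- def drm_encoding(s):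
--
--     mid = len(s) // 2
--     firstHaft = s[:mid]
--     secondHaft = s[mid:]
--
--     rotateFirst = sum(ord(char) - ord("A") for char in firstHaft)
--     rotateSecond = sum(ord(char) - ord("A") for char in secondHaft)
--
--     rotated_firstHaft = rotate_string(firstHaft, rotateFirst)
--     rotated_secondHaft = rotate_string(secondHaft, rotateSecond)
--
--     result = merge_strings(rotated_firstHaft, rotated_secondHaft)
--
--     return result
-- ===== SOURCE B (Python) =====
-- def drm_encoding(s):
--     mid = len(s) // 2
--     total = sum(ord(c) - ord("A") for c in s)
--     out = []
--     for i in range(mid):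
--         out.append(chr((ord(s[i]) + ord(s[mid + i]) - 2 * ord("A") + total) % 26 + ord("A")))
--     return "".join(out)
-- ===== Notes on version B (the rewrite author's own statement) =====
-- stated objective: simpler
-- what changed: Replaced the three-pass pipeline (two per-half rotations via rotate_string, then a zip-merge via merge_strings) with one total character sum and a single fused loop over the first half, since the nested modulos collapse into one closed-form (ord(s[i])+ord(s[mid+i])-2*65+total) % 26; both helpers are dropped.
import Mathlib
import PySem

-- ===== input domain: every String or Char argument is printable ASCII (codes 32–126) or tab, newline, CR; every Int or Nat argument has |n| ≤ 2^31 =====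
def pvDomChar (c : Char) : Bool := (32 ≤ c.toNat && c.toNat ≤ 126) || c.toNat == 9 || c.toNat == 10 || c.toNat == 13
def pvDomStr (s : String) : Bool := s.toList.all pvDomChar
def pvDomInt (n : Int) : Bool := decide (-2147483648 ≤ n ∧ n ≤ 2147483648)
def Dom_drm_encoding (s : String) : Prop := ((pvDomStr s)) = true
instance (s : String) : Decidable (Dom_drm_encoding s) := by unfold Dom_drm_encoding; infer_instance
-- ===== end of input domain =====

-- B collapses A's rotate+rotate+merge pipeline into one total sum and a single fused loop (simpler).

-- B: one total character sum and a single fused loop replace A's rotate/rotate/merge three-pass pipeline (simpler).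

-- ===== PORT A =====
def rotate_string (s : List Char) (rotation : Int) : List Char :=
  s.foldl (fun rotated char =>
    rotated ++ [Char.ofNat ((PySem.Int.mod ((char.toNat : Int) - 65 + rotation) 26 + 65).toNat)]) []

def merge_strings (s1 s2 : List Char) : List Char :=
  (s1.zip s2).foldl (fun merged p =>
    merged ++ [Char.ofNat ((PySem.Int.mod (((p.1.toNat : Int) - 65) + ((p.2.toNat : Int) - 65)) 26 + 65).toNat)]) []

def drm_encoding (s : String) : String :=
  let cs := s.toList
  let mid := PySem.Int.floordiv (PySem.List.len cs) 2
  let firstHaft := PySem.List.slice cs none (some mid)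
  let secondHaft := PySem.List.slice cs (some mid) none
  let rotateFirst := (firstHaft.map (fun c => (c.toNat : Int) - 65)).sum
  let rotateSecond := (secondHaft.map (fun c => (c.toNat : Int) - 65)).sum
  let rotated_firstHaft := rotate_string firstHaft rotateFirst
  let rotated_secondHaft := rotate_string secondHaft rotateSecond
  String.ofList (merge_strings rotated_firstHaft rotated_secondHaft)

-- ===== PORT B =====
def drm_encoding_alt (s : String) : String :=
  let cs := s.toList
  let mid := PySem.Int.floordiv (PySem.List.len cs) 2
  let total := (cs.map (fun c => (c.toNat : Int) - 65)).sum
  let out := (PySem.List.pyRange 0 mid 1).foldl (fun out i =>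
    out ++ [Char.ofNat ((PySem.Int.mod (((PySem.List.pyGetD cs i ' ').toNat : Int)
      + ((PySem.List.pyGetD cs (mid + i) ' ').toNat : Int) - 2 * 65 + total) 26 + 65).toNat)]) []
  String.ofList out

-- ===== PRECONDITION & SPEC =====
def Spec_drm_encoding (s : String) (out : String) : Prop := out = drm_encoding_alt s
instance (s : String) (out : String) : Decidable (Spec_drm_encoding s out) := by unfold Spec_drm_encoding; infer_instance

-- ===== CLAIM (what is proved, stated in full; the proofs are below) =====
def Claim_equal_drm_encoding : Prop := ∀ (s : String), Dom_drm_encoding s → Spec_drm_encoding s (drm_encoding s)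

-- ===== LEMMAS AND PROOFS =====
theorem pvCharOfNat_toNat (k : Nat) (h : k < 0xd800) : (Char.ofNat k).toNat = k := by
  unfold Char.ofNat Char.ofNatAux
  split
  · rfl
  · exact absurd (Or.inl h) (by assumption)

-- per-character arithmetic collapse: A's double modulo equals B's single one
theorem pvChar_collapse (a b rf rs : Int) :
    Char.ofNat ((PySem.Int.mod
        ((((Char.ofNat ((PySem.Int.mod (a - 65 + rf) 26 + 65).toNat)).toNat : Int) - 65)
          + (((Char.ofNat ((PySem.Int.mod (b - 65 + rs) 26 + 65).toNat)).toNat : Int) - 65)) 26 + 65).toNat)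
    = Char.ofNat ((PySem.Int.mod (a + b - 2 * 65 + (rf + rs)) 26 + 65).toNat) := by
  have h26 : (0:Int) < 26 := by norm_num
  have hm1 := PySem.Int.mod_nonneg (a - 65 + rf) h26
  have hl1 := PySem.Int.mod_lt (a - 65 + rf) h26
  have hm2 := PySem.Int.mod_nonneg (b - 65 + rs) h26
  have hl2 := PySem.Int.mod_lt (b - 65 + rs) h26
  rw [pvCharOfNat_toNat _ (by omega), pvCharOfNat_toNat _ (by omega),
    Int.toNat_of_nonneg (by omega : (0:Int) ≤ PySem.Int.mod (a - 65 + rf) 26 + 65),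
    Int.toNat_of_nonneg (by omega : (0:Int) ≤ PySem.Int.mod (b - 65 + rs) 26 + 65)]
  congr 2
  simp only [PySem.Int.mod_eq_emod_of_pos h26]
  omega

theorem pvMain (s : String) : drm_encoding s = drm_encoding_alt s := by
  unfold drm_encoding drm_encoding_alt rotate_string merge_strings
  simp only [PySem.List.len_eq]
  rw [show PySem.Int.floordiv ((s.toList.length : Nat) : Int) 2
        = ((s.toList.length / 2 : Nat) : Int) from by
      exact_mod_cast PySem.Int.floordiv_natCast s.toList.length 2]
  simp only [PySem.List.slice_to_natCast, PySem.List.slice_from_natCast,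
    PySem.List.pyRange_zero_nat, PySem.List.foldl_append_singleton_eq_map,
    List.nil_append, List.map_map]
  congr 1
  set cs := s.toList with hcs
  set n := cs.length with hn
  set m := n / 2 with hm
  have htot : (cs.map (fun c => (c.toNat : Int) - 65)).sum
      = ((cs.take m).map (fun c => (c.toNat : Int) - 65)).sum
        + ((cs.drop m).map (fun c => (c.toNat : Int) - 65)).sum := by
    conv_lhs => rw [← List.take_append_drop m cs]
    rw [List.map_append, List.sum_append]
  rw [List.zip_map, List.map_map, htot]
  apply List.ext_getElem
  · simp [List.length_zip]
    omega
  · intro i h1 h2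
    simp only [List.getElem_map, List.getElem_zip, List.getElem_range, Function.comp_apply,
      Prod.map_apply]
    have hi : i < m := by
      simp [List.length_zip] at h1
      omega
    have hin : i < n := by omega
    have hmin : m + i < n := by omega
    rw [List.getElem_take, List.getElem_drop]
    have g1 : PySem.List.pyGetD cs (↑i) ' ' = cs[i] := by
      rw [PySem.List.pyGetD_natCast, List.getD_eq_getElem cs ' ' hin]
    have g2 : PySem.List.pyGetD cs ((↑m : Int) + ↑i) ' ' = cs[m + i] := by
      rw [show ((↑m : Int) + ↑i) = ((m + i : Nat) : Int) by push_cast; ring,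
        PySem.List.pyGetD_natCast, List.getD_eq_getElem cs ' ' hmin]
    rw [g1, g2]
    exact pvChar_collapse _ _ _ _

-- ===== VERDICT (by name: the statement is the Claim_ definition above) =====
theorem drm_encoding_spec : Claim_equal_drm_encoding := by
  intro s _
  unfold Spec_drm_encoding
  exact pvMain s
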